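-- pv_equiv track=rewrite | github.com/8388688/Symbiosis | main.py | decode_version
-- ===== SOURCE A (Python) =====
-- def decode_version(version_str: str):
--     RATE = 1000
--     # 高版本号相对低一级的版本号的进制
--     # 如：在 RATE = 100 的情况下，v0.4.1 等价于 v0.3.101 和 v0.2.201
--     dot_rate = version_str.count(".")
--     lst_ver_code = version_str.removeprefix("v").removeprefix("V").split(".")
--     ver_code = 0
--     ch = 0
--     for i in (int(j) for j in lst_ver_code[::-1]):
--         ver_code += RATE ** ch * i
--         ch += 1
--     ver_code *= RATE ** (4 - dot_rate)
--     # 理论上 `ver_code *= RATE ** -dot_rate` 也是可以的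
--     return ver_code
-- ===== SOURCE B (Python) =====
-- def decode_version(version_str: str):
--     RATE = 1000
--     dot_rate = version_str.count(".")
--     parts = version_str.removeprefix("v").removeprefix("V").split(".")
--     ver_code = 0
--     for p in parts:
--         ver_code = ver_code * RATE + int(p)
--     return ver_code * RATE ** (4 - dot_rate)
-- ===== Notes on version B (the rewrite author's own statement) =====
-- stated objective: simpler
-- what changed: Replaces the reversed traversal with an explicit power/position accumulator by a forward Horner evaluation (acc = acc*RATE + int(p)), removing the list reversal and per-step exponentiation.
-- outside the precondition, e.g. on decode_version('1.2.3.4.5.6'): A returns 1002003004005.006, B returns 1002003004005.006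
import Mathlib
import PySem

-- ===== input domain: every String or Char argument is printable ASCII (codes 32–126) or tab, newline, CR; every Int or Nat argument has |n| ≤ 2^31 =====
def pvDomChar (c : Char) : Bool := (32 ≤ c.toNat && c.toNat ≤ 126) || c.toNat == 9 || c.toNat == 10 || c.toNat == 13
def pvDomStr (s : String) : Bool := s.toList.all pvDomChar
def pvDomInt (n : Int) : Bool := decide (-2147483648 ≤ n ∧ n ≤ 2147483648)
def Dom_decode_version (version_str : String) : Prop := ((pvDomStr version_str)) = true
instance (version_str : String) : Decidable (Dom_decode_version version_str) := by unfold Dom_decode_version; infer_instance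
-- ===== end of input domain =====

-- B changes the loop only: forward Horner evaluation instead of reversed power accumulation; same preprocessing and scaling.

-- ===== PORT A =====
-- str.removeprefix (not in PySem): drop the prefix if present, exact port
def pvRemovePrefix (cs pre : List Char) : List Char :=
  if pre.isPrefixOf cs then cs.drop pre.length else cs

-- parts of A's string after removing the 'v'/'V' prefix, split on '.'
def pvParts (version_str : String) : List (List Char) :=
  PySem.Chars.splitOn (pvRemovePrefix (pvRemovePrefix version_str.toList ['v']) ['V']) ['.']

def decode_version (version_str : String) : Int :=
  let dot_rate := PySem.Str.count version_str "."
  let lst_ver_code := pvParts version_str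
  -- loop over the reversed list with state (ver_code, ch); int(j) via ofChars? (Pre_ guarantees success)
  let st := (lst_ver_code.reverse).foldl
    (fun (st : Int × Nat) j => (st.1 + (1000 : Int) ^ st.2 * (PySem.Int.ofChars? j).getD 0, st.2 + 1))
    ((0 : Int), (0 : Nat))
  -- Pre_ guarantees dot_rate ≤ 4, so the Nat subtraction matches Python's exponent
  st.1 * (1000 : Int) ^ (4 - dot_rate)

-- ===== PORT B =====
def decode_version_alt (version_str : String) : Int :=
  let dot_rate := PySem.Str.count version_str "."
  let parts := pvParts version_str
  let ver_code := parts.foldl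
    (fun (acc : Int) p => acc * 1000 + (PySem.Int.ofChars? p).getD 0) 0
  ver_code * (1000 : Int) ^ (4 - dot_rate)

-- ===== PRECONDITION & SPEC =====
-- Pre_ excludes inputs where A does not return an int: a part int() cannot parse (ValueError),
-- and more than 4 dots (RATE ** negative is a float in Python).
def Pre_decode_version (version_str : String) : Prop :=
  ((pvParts version_str).all (fun p => (PySem.Int.ofChars? p).isSome)) = true ∧
  PySem.Str.count version_str "." ≤ 4
instance (version_str : String) : Decidable (Pre_decode_version version_str) := by
  unfold Pre_decode_version; infer_instance
def pvWitness_decode_version : String := "v1.2.3"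

def Spec_decode_version (version_str : String) (out : Int) : Prop := out = decode_version_alt version_str
instance (version_str : String) (out : Int) : Decidable (Spec_decode_version version_str out) := by unfold Spec_decode_version; infer_instance

-- ===== CLAIM (what is proved, stated in full; the proofs are below) =====
def Claim_equal_decode_version : Prop := ∀ (version_str : String), Dom_decode_version version_str → Pre_decode_version version_str → Spec_decode_version version_str (decode_version version_str)

-- ===== LEMMAS AND PROOFS =====

-- the two loop bodies, named for the lemmas
def pvAStep (st : Int × Nat) (j : List Char) : Int × Nat :=
  (st.1 + (1000 : Int) ^ st.2 * (PySem.Int.ofChars? j).getD 0, st.2 + 1)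
def pvBStep (acc : Int) (p : List Char) : Int :=
  acc * 1000 + (PySem.Int.ofChars? p).getD 0

lemma pvAStep_state (l : List (List Char)) (vc : Int) (ch : Nat) :
    l.foldl pvAStep (vc, ch) =
      (vc + (1000 : Int) ^ ch * (l.foldl pvAStep ((0 : Int), (0 : Nat))).1, ch + l.length) := by
  induction l generalizing vc ch with
  | nil => simp
  | cons p rest ih =>
    simp only [List.foldl_cons, pvAStep]
    rw [ih, ih ((0:Int) + (1000:Int) ^ 0 * _) 1]
    simp only [Prod.mk.injEq]
    refine ⟨?_, by simp; omega⟩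
    simp [pow_succ]
    ring

lemma pvBStep_shift (l : List (List Char)) (acc : Int) :
    l.foldl pvBStep acc = acc * (1000 : Int) ^ l.length + l.foldl pvBStep 0 := by
  induction l generalizing acc with
  | nil => simp
  | cons p rest ih =>
    simp only [List.foldl_cons, pvBStep]
    rw [ih (acc * 1000 + _), ih ((0:Int) * 1000 + _)]
    simp [pow_succ]
    ring

lemma pv_loops_agree (l : List (List Char)) :
    (l.reverse.foldl pvAStep ((0 : Int), (0 : Nat))).1 = l.foldl pvBStep 0 := by
  induction l with
  | nil => simp
  | cons p rest ih =>
    simp only [List.reverse_cons, List.foldl_append, List.foldl_cons, List.foldl_nil]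
    rw [pvAStep_state rest.reverse 0 0]
    simp only [pvAStep]
    rw [pvBStep_shift rest (pvBStep 0 p)]
    simp only [pvBStep, List.length_reverse]
    rw [ih]
    simp
    ring

-- ===== VERDICT (by name: the statement is the Claim_ definition above) =====
theorem decode_version_spec : Claim_equal_decode_version := by
  intro s _ _
  unfold Spec_decode_version decode_version decode_version_alt
  have h := pv_loops_agree (pvParts s)
  unfold pvAStep pvBStep at h
  dsimp only
  rw [h]
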